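-- pv_equiv track=rewrite | github.com/Kajal2000/Web_scraping | Imdb website/task_11.py | analyse_genre
-- ===== SOURCE A (Python) =====
-- def analyse_genre(all_genre_data,particular_genre):
--         genre_dic = {}
--         for a in particular_genre:
--                 count = 0
--                 for b in all_genre_data:
--                         if a == b:
--                                 count = count + 1
--                 genre_dic[a] = count
--         return(genre_dic)
-- ===== SOURCE B (Python) =====
-- def analyse_genre(all_genre_data, particular_genre):
--     genre_dic = {a: 0 for a in particular_genre}
--     wanted = set(particular_genre)
--     for g in all_genre_data:
--         if g in wanted:
--             genre_dic[g] += 1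
--     return genre_dic
-- ===== Notes on version B (the rewrite author's own statement) =====
-- stated objective: faster
-- what changed: Instead of rescanning all_genre_data once per genre, B pre-initializes the dict with zeros and makes one pass over all_genre_data, incrementing counts for genres in a set of wanted keys.
import Mathlib
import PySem

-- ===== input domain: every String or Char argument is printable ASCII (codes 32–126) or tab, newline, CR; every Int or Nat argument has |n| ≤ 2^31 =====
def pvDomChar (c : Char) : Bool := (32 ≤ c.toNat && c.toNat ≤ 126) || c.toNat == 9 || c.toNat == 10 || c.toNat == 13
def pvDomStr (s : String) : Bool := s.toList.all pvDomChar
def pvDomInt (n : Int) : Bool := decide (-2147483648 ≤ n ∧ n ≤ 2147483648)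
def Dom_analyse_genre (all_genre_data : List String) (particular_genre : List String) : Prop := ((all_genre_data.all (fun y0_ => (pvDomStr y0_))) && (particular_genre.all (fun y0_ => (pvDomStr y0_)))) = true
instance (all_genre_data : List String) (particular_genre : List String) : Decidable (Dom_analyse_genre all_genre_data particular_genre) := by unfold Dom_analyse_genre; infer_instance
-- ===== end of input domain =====

-- B replaces A's per-genre rescan of all_genre_data with one pass over all_genre_data
-- incrementing a pre-zeroed dict (objective: faster, one pass instead of nested loops).

-- ===== PORT A =====
def analyse_genre (all_genre_data : List String) (particular_genre : List String) : List (String × Int) :=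
  (particular_genre.foldl
    (fun d a =>
      d.insert a (all_genre_data.foldl (fun count b => if a == b then count + 1 else count) (0 : Int)))
    PySem.Dict.empty).items

-- ===== PORT B =====
def analyse_genre_alt (all_genre_data : List String) (particular_genre : List String) : List (String × Int) :=
  let genre_dic := particular_genre.foldl (fun d a => d.insert a (0 : Int)) PySem.Dict.empty
  let wanted : PySem.Set String := PySem.Set.ofList particular_genre
  (all_genre_data.foldl
    (fun d g => if PySem.Set.contains wanted g then d.modify g 0 (· + 1) else d)
    genre_dic).items

-- ===== PRECONDITION & SPEC =====
def Spec_analyse_genre (all_genre_data : List String) (particular_genre : List String) (out : List (String × Int)) : Prop := out = analyse_genre_alt all_genre_data particular_genre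
instance (all_genre_data : List String) (particular_genre : List String) (out : List (String × Int)) : Decidable (Spec_analyse_genre all_genre_data particular_genre out) := by unfold Spec_analyse_genre; infer_instance

-- ===== CLAIM (what is proved, stated in full; the proofs are below) =====
def Claim_equal_analyse_genre : Prop := ∀ (all_genre_data : List String) (particular_genre : List String), Dom_analyse_genre all_genre_data particular_genre → Spec_analyse_genre all_genre_data particular_genre (analyse_genre all_genre_data particular_genre)

-- ===== LEMMAS AND PROOFS =====

-- A's inner loop counts occurrences of a.
theorem inner_count (all : List String) (a : String) :
    all.foldl (fun count b => if a == b then count + 1 else count) (0 : Int) = (all.count a : Int) := by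
  have h : (fun (count : Int) b => if a == b then count + 1 else count)
      = (fun count b => if b == a then count + 1 else count) := by
    funext c b; rw [Bool.beq_comm]
  rw [h, PySem.List.foldl_beq_add_one]
  simp

-- getD through a fold of inserts whose value depends only on the key.
theorem getD_foldl_insert_fun (f : String → Int) (l : List String) (d : PySem.Dict String Int) (k : String) :
    (l.foldl (fun d a => d.insert a (f a)) d).getD k 0
      = if k ∈ l then f k else d.getD k 0 := by
  induction l generalizing d with
  | nil => simp
  | cons a t ih =>
    simp only [List.foldl_cons, ih, PySem.Dict.getD_insert, List.mem_cons]
    by_cases hk : k ∈ t <;> by_cases he : k = a <;> simp [hk, he]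

-- getD through B's guarded increment loop.
theorem getD_loop (w : PySem.Set String) (l : List String) (d : PySem.Dict String Int) (a : String) :
    (l.foldl (fun d g => if PySem.Set.contains w g then d.modify g 0 (· + 1) else d) d).getD a 0
      = d.getD a 0 + (if a ∈ w then (l.count a : Int) else 0) := by
  induction l generalizing d with
  | nil => simp
  | cons g t ih =>
    simp only [List.foldl_cons]
    by_cases hg : PySem.Set.contains w g = true
    · rw [if_pos hg, ih, PySem.Dict.getD_modify]
      by_cases he : a = g
      · subst he
        have haw : a ∈ w := (PySem.Set.contains_iff w a).1 hg
        simp [haw, List.count_cons_self]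
        ring
      · simp [he, Ne.symm he]
    · rw [if_neg hg, ih]
      by_cases haw : a ∈ w
      · have hga : g ≠ a := fun h => hg ((PySem.Set.contains_iff w g).2 (h ▸ haw))
        simp [haw, hga]
      · simp [haw]

-- keys are untouched by B's loop when every wanted key is already present.
theorem keys_loop (w : PySem.Set String) (l : List String) (d : PySem.Dict String Int)
    (h : ∀ x ∈ w, d.contains x = true) :
    (l.foldl (fun d g => if PySem.Set.contains w g then d.modify g 0 (· + 1) else d) d).keys = d.keys := by
  induction l generalizing d with
  | nil => rfl
  | cons g t ih =>
    simp only [List.foldl_cons]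
    by_cases hg : PySem.Set.contains w g = true
    · have hgw : g ∈ w := (PySem.Set.contains_iff w g).1 hg
      have hc : d.contains g = true := h g hgw
      have hkeys : (d.modify g 0 (· + 1)).keys = d.keys := by
        rw [PySem.Dict.keys_modify]
        exact PySem.Dict.keys_insert_of_contains d _ hc
      rw [if_pos hg, ih, hkeys]
      intro x hx
      rw [PySem.Dict.contains_modify]
      simp [h x hx]
    · rw [if_neg hg, ih _ h]

theorem analyse_genre_spec : Claim_equal_analyse_genre := by
  intro all pg _
  unfold Spec_analyse_genre analyse_genre analyse_genre_alt
  set fA : PySem.Dict String Int :=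
    pg.foldl (fun d a => d.insert a (all.foldl (fun c b => if a == b then c + 1 else c) (0 : Int)))
      PySem.Dict.empty with hfA
  set d0 : PySem.Dict String Int := pg.foldl (fun d a => d.insert a (0 : Int)) PySem.Dict.empty with hd0
  set w : PySem.Set String := PySem.Set.ofList pg with hw
  set fB : PySem.Dict String Int :=
    all.foldl (fun d g => if PySem.Set.contains w g then d.modify g 0 (· + 1) else d) d0 with hfB
  have keysA : fA.keys = PySem.Set.ofList pg := by
    rw [hfA, PySem.Dict.keys_foldl_insert pg
      (fun d a => all.foldl (fun c b => if a == b then c + 1 else c) (0 : Int)) PySem.Dict.empty,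
      PySem.Dict.keys_empty, PySem.Set.update_nil_left]
  have keys0 : d0.keys = PySem.Set.ofList pg := by
    rw [hd0, PySem.Dict.keys_foldl_insert pg (fun _ _ => (0 : Int)) PySem.Dict.empty,
      PySem.Dict.keys_empty, PySem.Set.update_nil_left]
  have keysB : fB.keys = PySem.Set.ofList pg := by
    rw [hfB, keys_loop w all d0 ?_, keys0]
    intro x hx
    rw [PySem.Dict.contains_iff_mem_keys, keys0]
    exact hx
  have nodA : fA.keys.Nodup := by rw [keysA]; exact PySem.Set.nodup_ofList pg
  have nodB : fB.keys.Nodup := by rw [keysB]; exact PySem.Set.nodup_ofList pg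
  rw [PySem.Dict.items_eq_map_keys fA nodA 0, PySem.Dict.items_eq_map_keys fB nodB 0, keysA, keysB]
  apply List.map_congr_left
  intro k hk
  have hkpg : k ∈ pg := (PySem.Set.mem_ofList pg k).1 hk
  have hA : fA.getD k 0 = (all.count k : Int) := by
    rw [hfA, getD_foldl_insert_fun
      (fun a => all.foldl (fun c b => if a == b then c + 1 else c) (0 : Int)) pg PySem.Dict.empty k,
      if_pos hkpg, inner_count]
  have h0 : d0.getD k 0 = 0 := by
    rw [hd0, getD_foldl_insert_fun (fun _ => (0 : Int)) pg PySem.Dict.empty k]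
    simp [hkpg]
  have hB : fB.getD k 0 = (all.count k : Int) := by
    rw [hfB, getD_loop w all d0 k, h0]
    have hkw : k ∈ w := (PySem.Set.mem_ofList pg k).2 hkpg
    simp [hkw]
  simp [hA, hB]
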